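-- pv_equiv track=rewrite | github.com/TheSachari/Thesis | collective_functions.py | update_dep
-- ===== SOURCE A (Python) =====
-- def update_dep(required_departure):
--     """
--     Reindex a departure dictionary so that step numbers are consecutive.
--
--     Parameters
--     ----------
--     required_departure : dict[int, list]
--         Departure dict mapping step -> list of acceptable vehicle functions.
--         Steps < 99 correspond to standard departure steps in this codebase.
--
--     Returns
--     -------
--     dict[int, list]
--         New departure dict with steps renumbered consecutively starting at 1 (for steps < 99),
--         while preserving any special reinforcement steps (>= 99).
--     """
--
--     new_d = {}
--     new_k = 1
--     for k, v in sorted(required_departure.items()):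
--         if k < 99:
--             new_d[new_k] = v
--             new_k += 1
--         else:
--             new_d[k] = v
--
--     return new_d
-- ===== SOURCE B (Python) =====
-- def update_dep(required_departure):
--     pending = dict(required_departure)
--     pairs = []
--     next_idx = 1
--     while pending:
--         k = min(pending)
--         v = pending.pop(k)
--         if k < 99:
--             pairs.append((next_idx, v))
--             next_idx += 1
--         else:
--             pairs.append((k, v))
--     return dict(pairs)
-- ===== Notes on version B (the rewrite author's own statement) =====
-- stated objective: alternative
-- what changed: Replaces the sorted() loop with a manual renumbering counter by an iterative selection: repeatedly pop the minimum key from a working copy of the dict, appending the renumbered (or preserved special) pair to a list, then assemble the result dict from that pair list.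
import Mathlib
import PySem

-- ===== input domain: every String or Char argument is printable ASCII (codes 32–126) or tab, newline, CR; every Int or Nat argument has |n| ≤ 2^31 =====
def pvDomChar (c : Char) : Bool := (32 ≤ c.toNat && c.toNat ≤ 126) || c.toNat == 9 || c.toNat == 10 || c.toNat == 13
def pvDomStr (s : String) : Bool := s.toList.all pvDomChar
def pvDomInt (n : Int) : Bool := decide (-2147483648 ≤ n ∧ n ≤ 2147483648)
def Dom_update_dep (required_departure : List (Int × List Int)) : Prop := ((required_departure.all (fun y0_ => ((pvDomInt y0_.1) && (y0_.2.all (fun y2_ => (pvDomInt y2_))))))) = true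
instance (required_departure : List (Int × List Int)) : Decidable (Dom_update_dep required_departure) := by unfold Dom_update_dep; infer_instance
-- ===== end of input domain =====

-- B replaces sorted()+manual counter by an iterative selection loop: repeatedly pop the
-- minimum key from a working copy of the dict, appending renumbered pairs (objective: alternative).

-- ===== PORT A =====
-- sorted(required_departure.items()) compares (key, value) tuples; dict keys are distinct,
-- so the comparison is decided by the key alone and the list values are never compared:
-- sorting with key = first component is exact here.
def update_dep (required_departure : List (Int × List Int)) : List (Int × List Int) :=
  let d := PySem.Dict.ofList required_departure
  let r := (PySem.List.sorted d.items (fun p => p.1) false).foldl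
    (fun (st : PySem.Dict Int (List Int) × Int) p =>
      if p.1 < 99 then (st.1.insert st.2 p.2, st.2 + 1) else (st.1.insert p.1 p.2, st.2))
    (PySem.Dict.empty, 1)
  r.1.items

-- ===== PORT B =====
-- termination of the while loop: popping the found minimum key shortens the pending list.
theorem pvBuild_dec (pending : List (Int × List Int)) (k : Int)
    (hm : PySem.List.min? (pending.map (·.1)) (fun k => k) = some k) :
    (pending.eraseP (fun p => p.1 == k)).length < pending.length := by
  have hk : k ∈ pending.map (·.1) := PySem.List.min?_mem hm
  rcases List.mem_map.mp hk with ⟨p, hp, hpk⟩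
  have := List.length_eraseP_of_mem (p := fun q => q.1 == k) hp (by simp [hpk])
  have hpos : 0 < pending.length := List.length_pos_of_mem hp
  omega

-- the while loop: min(pending) iterates the keys (PySem.List.min? over them, first minimum),
-- pending.pop(k) = look up the unique pair with key k (find?) and remove it (eraseP);
-- keys are distinct, so this is exactly Python's pop. 'while pending' ↔ min? = some _.
def pvLoop (pending : List (Int × List Int)) (pairs : List (Int × List Int)) (next_idx : Int) :
    List (Int × List Int) :=
  match hm : PySem.List.min? (pending.map (·.1)) (fun k => k) with
  | none => pairs
  | some k =>
    let v := ((pending.find? (fun p => p.1 == k)).map (·.2)).getD []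
    let rest := pending.eraseP (fun p => p.1 == k)
    if k < 99 then pvLoop rest (pairs ++ [(next_idx, v)]) (next_idx + 1)
    else pvLoop rest (pairs ++ [(k, v)]) next_idx
termination_by pending.length
decreasing_by
  · exact pvBuild_dec pending k hm
  · exact pvBuild_dec pending k hm

def update_dep_alt (required_departure : List (Int × List Int)) : List (Int × List Int) :=
  let d := PySem.Dict.ofList required_departure
  (PySem.Dict.ofList (pvLoop d.items [] 1)).items

-- ===== PRECONDITION & SPEC =====
def Spec_update_dep (required_departure : List (Int × List Int)) (out : List (Int × List Int)) : Prop := out = update_dep_alt required_departure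
instance (required_departure : List (Int × List Int)) (out : List (Int × List Int)) : Decidable (Spec_update_dep required_departure out) := by unfold Spec_update_dep; infer_instance

-- ===== CLAIM (what is proved, stated in full; the proofs are below) =====
def Claim_equal_update_dep : Prop := ∀ (required_departure : List (Int × List Int)), Dom_update_dep required_departure → Spec_update_dep required_departure (update_dep required_departure)

-- ===== LEMMAS AND PROOFS =====

-- A's step function.
def pvStepA : PySem.Dict Int (List Int) × Int → Int × List Int → PySem.Dict Int (List Int) × Int :=
  fun st p =>
    if p.1 < 99 then (st.1.insert st.2 p.2, st.2 + 1) else (st.1.insert p.1 p.2, st.2)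

-- The renumbered pair sequence A's loop inserts, read off a (sorted) items list.
def pvRenum : List (Int × List Int) → Int → List (Int × List Int)
  | [], _ => []
  | p :: t, next =>
    if p.1 < 99 then (next, p.2) :: pvRenum t (next + 1) else (p.1, p.2) :: pvRenum t next

-- A's fold is the insertion of pvRenum's pairs, in order.
theorem pv_foldA (s : List (Int × List Int)) :
    ∀ (d0 : PySem.Dict Int (List Int)) (next : Int),
      (s.foldl pvStepA (d0, next)).1 =
        (pvRenum s next).foldl (fun d p => d.insert p.1 p.2) d0 := by
  induction s with
  | nil => intro d0 next; rfl
  | cons p t ih =>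
    intro d0 next
    by_cases hp : p.1 < 99 <;>
      simp only [List.foldl_cons, pvStepA, pvRenum, hp] <;>
      exact ih _ _

-- In a list with distinct keys, a key determines its pair.
theorem pv_key_inj (l : List (Int × List Int)) (hnd : (l.map (·.1)).Nodup)
    {p q : Int × List Int} (hp : p ∈ l) (hq : q ∈ l) (h : p.1 = q.1) : p = q :=
  List.inj_on_of_nodup_map hnd hp hq h

-- The selection loop appends pvRenum of the key-sorted list to its accumulator.
theorem pv_build_eq (n : Nat) : ∀ (l : List (Int × List Int)), l.length = n →
    (l.map (·.1)).Nodup → ∀ (acc : List (Int × List Int)) (next : Int),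
    pvLoop l acc next = acc ++ pvRenum (PySem.List.sorted l (fun p => p.1) false) next := by
  induction n using Nat.strong_induction_on with
  | _ n ih =>
    intro l hlen hnd acc next
    match hs : PySem.List.sorted l (fun p => p.1) false with
    | [] =>
      have hl : l = [] := (PySem.List.sorted_eq_nil_iff l _ _).mp hs
      subst hl
      rw [pvLoop]
      simp only [pvRenum, List.append_nil]
      rfl
    | p :: t =>
      have hpl : p ∈ l := (PySem.List.mem_sorted l _ _ p).mp (hs ▸ List.mem_cons_self ..)
      -- the first minimum over the distinct keys is p.1
      have hmin : PySem.List.min? (l.map (·.1)) (fun k => k) = some p.1 := by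
        have hne : l.map (·.1) ≠ [] := by
          intro h; exact absurd (List.map_eq_nil_iff.mp h ▸ hpl) (List.not_mem_nil)
        have hsome : PySem.List.min? (l.map (·.1)) (fun k : Int => k) ≠ none := fun h =>
          hne ((PySem.List.min?_eq_none_iff (l.map (·.1)) (fun k : Int => k)).mp h)
        rcases Option.ne_none_iff_exists'.mp hsome with ⟨m, hm⟩
        have hmem : m ∈ l.map (·.1) := PySem.List.min?_mem hm
        rcases List.mem_map.mp hmem with ⟨q, hq, hqm⟩
        have h1 : m ≤ p.1 := PySem.List.min?_isMin hm _ (List.mem_map_of_mem hpl)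
        have h2 : p.1 ≤ q.1 := PySem.List.key_head_sorted_le l (fun p => p.1) hs q hq
        have : q = p := pv_key_inj l hnd hq hpl (by omega)
        rw [hm, ← hqm, this]
      -- find? returns exactly p
      have hfind : l.find? (fun q => q.1 == p.1) = some p := by
        have hsome : (l.find? (fun q => q.1 == p.1)).isSome := by
          rw [List.find?_isSome]; exact ⟨p, hpl, by simp⟩
        rcases Option.isSome_iff_exists.mp hsome with ⟨q, hq⟩
        have hqmem : q ∈ l := List.mem_of_find?_eq_some hq
        have hqkey : q.1 = p.1 := by simpa using List.find?_some hq
        rw [hq, pv_key_inj l hnd hqmem hpl hqkey]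
      -- removing p leaves a list whose sorted order is t
      set rest := l.eraseP (fun q => q.1 == p.1) with hrest
      have hperm : (p :: rest).Perm l := by
        rcases List.exists_of_eraseP hpl (p := fun q => q.1 == p.1) (by simp)
          with ⟨a, l1, l2, hnotl1, hpa, hl, he⟩
        have ha : a = p := pv_key_inj l hnd (hl ▸ (by simp)) hpl (by simpa using hpa)
        rw [hrest, he, hl, ha]
        exact (List.perm_middle).symm
      have hperm_t : t.Perm rest := by
        have h1 : (p :: t).Perm (p :: rest) :=
          ((hs ▸ PySem.List.sorted_perm l (fun p => p.1) false)).trans hperm.symm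
        exact h1.cons_inv
      have hrest_nd : (rest.map (·.1)).Nodup :=
        (List.Sublist.map (fun p : Int × List Int => p.1) List.eraseP_sublist).nodup hnd
      have hsorted_rest : PySem.List.sorted rest (fun p => p.1) false = t := by
        apply PySem.List.sorted_eq_of_perm_of_pairwise_lt _ _ _ hperm_t
        -- t is strictly increasing in keys: sorted gives ≤, distinct keys give ≠
        have hle : (p :: t).Pairwise (fun a b => a.1 ≤ b.1) := by
          have := PySem.List.sorted_pairwise l (fun p => p.1); rwa [hs] at this
        have hnd' : ((p :: t).map (·.1)).Nodup := by
          have : ((PySem.List.sorted l (fun p => p.1) false).map (·.1)).Perm (l.map (·.1)) :=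
            (PySem.List.sorted_perm l (fun p => p.1) false).map _
          rw [hs] at this
          exact this.nodup_iff.mpr hnd
        have hne : (p :: t).Pairwise (fun a b => a.1 ≠ b.1) := List.pairwise_map.mp hnd'
        have hlt : (p :: t).Pairwise (fun a b => a.1 < b.1) :=
          (hle.and hne).imp (fun h => lt_of_le_of_ne h.1 h.2)
        exact hlt.of_cons
      -- unfold one step of pvLoop and recurse
      rw [pvLoop, hmin]
      have hlt : rest.length < n := by
        rw [hrest]
        have := pvBuild_dec l p.1 hmin
        omega
      have hrec := fun a nx => ih rest.length hlt rest rfl hrest_nd a nx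
      simp only [hfind, Option.map_some, Option.getD_some]
      by_cases hp : p.1 < 99 <;>
        simp only [hp, ite_true, ite_false, pvRenum] <;>
        rw [← hrest, hrec, hsorted_rest] <;>
        simp

theorem update_dep_eq_alt (rd : List (Int × List Int)) :
    update_dep rd = update_dep_alt rd := by
  have hnd : ((PySem.Dict.ofList rd).items.map (·.1)).Nodup := PySem.Dict.nodup_keys_ofList rd
  show ((PySem.List.sorted (PySem.Dict.ofList rd).items (fun p => p.1) false).foldl pvStepA
      (PySem.Dict.empty, 1)).1.items
    = (PySem.Dict.ofList (pvLoop (PySem.Dict.ofList rd).items [] 1)).items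
  rw [pv_build_eq (PySem.Dict.ofList rd).items.length (PySem.Dict.ofList rd).items rfl hnd [] 1,
    pv_foldA]
  rfl

-- ===== VERDICT (by name: the statement is the Claim_ definition above) =====
theorem update_dep_spec : Claim_equal_update_dep := by
  intro rd _
  unfold Spec_update_dep
  exact update_dep_eq_alt rd
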